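-- pv_equiv track=rewrite | github.com/josejalvarezm/preflight | benchmarks/v2/ablation/ablation_six_boundary.py | check
-- ===== SOURCE A (Python) =====
-- import csv, os, re, unicodedata, json
--
-- BOUNDARIES = {
--     "BOUNDARY-001": {
--         "triggers": ["charity", "donation", "donate", "align", "patterns",
--                       "political", "affiliation"],
--         "subjects": ["political", "party", "voting", "donation"],
--     },
--     "BOUNDARY-002": {
--         "triggers": ["password", "credential", "token", "secret", "key",
--                       "api", "auth"],
--         "subjects": ["password", "credential", "secret", "token"],
--     },
--     "BOUNDARY-003": {
--         "triggers": ["medical", "health", "diagnosis", "prescription",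
--                       "condition", "treatment"],
--         "subjects": ["medical", "health", "diagnosis", "prescription"],
--     },
--     "BOUNDARY-004": {
--         "triggers": ["salary", "compensation", "income", "pay", "bonus",
--                       "stock"],
--         "subjects": ["salary", "income", "compensation"],
--     },
--     "BOUNDARY-005": {
--         "triggers": ["location", "address", "home", "gps", "coordinates",
--                       "whereabouts"],
--         "subjects": ["location", "address", "home"],
--     },
--     "BOUNDARY-006": {
--         "triggers": ["proprietary", "confidential", "internal", "source",
--                       "algorithm", "model", "weights", "training", "dataset",
--                       "pii", "personal"],
--         "subjects": ["proprietary", "confidential", "internal", "source",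
--                       "algorithm", "weights", "training", "dataset", "pii",
--                       "personal", "identifiable"],
--     },
-- }
--
-- def norm(w):
--     return unicodedata.normalize("NFKC", w).lower()
--
-- def check(kws, mode):
--     for b in BOUNDARIES.values():
--         t = {norm(x) for x in b["triggers"]}
--         s = {norm(x) for x in b["subjects"]}
--         ht = bool(kws & t)
--         hs = bool(kws & s)
--         if mode == "trigger" and ht: return True
--         if mode == "subject" and hs: return True
--         if mode == "intersect" and (ht and hs): return True
--         if mode == "union" and (ht or hs): return True
--     return False
-- ===== SOURCE B (Python) =====
-- import unicodedata
--
-- BOUNDARIES = {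
--     "BOUNDARY-001": {
--         "triggers": ["charity", "donation", "donate", "align", "patterns",
--                       "political", "affiliation"],
--         "subjects": ["political", "party", "voting", "donation"],
--     },
--     "BOUNDARY-002": {
--         "triggers": ["password", "credential", "token", "secret", "key",
--                       "api", "auth"],
--         "subjects": ["password", "credential", "secret", "token"],
--     },
--     "BOUNDARY-003": {
--         "triggers": ["medical", "health", "diagnosis", "prescription",
--                       "condition", "treatment"],
--         "subjects": ["medical", "health", "diagnosis", "prescription"],
--     },
--     "BOUNDARY-004": {
--         "triggers": ["salary", "compensation", "income", "pay", "bonus",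
--                       "stock"],
--         "subjects": ["salary", "income", "compensation"],
--     },
--     "BOUNDARY-005": {
--         "triggers": ["location", "address", "home", "gps", "coordinates",
--                       "whereabouts"],
--         "subjects": ["location", "address", "home"],
--     },
--     "BOUNDARY-006": {
--         "triggers": ["proprietary", "confidential", "internal", "source",
--                       "algorithm", "model", "weights", "training", "dataset",
--                       "pii", "personal"],
--         "subjects": ["proprietary", "confidential", "internal", "source",
--                       "algorithm", "weights", "training", "dataset", "pii",
--                       "personal", "identifiable"],
--     },
-- }
--
-- def norm(w):
--     return unicodedata.normalize("NFKC", w).lower()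
--
-- def check(kws, mode):
--     # Dispatch on mode first; for trigger/subject/union one global precomputed
--     # union set suffices; only 'intersect' needs a per-boundary pass.
--     if mode == "trigger":
--         T = {norm(x) for b in BOUNDARIES.values() for x in b["triggers"]}
--         return bool(kws & T)
--     if mode == "subject":
--         S = {norm(x) for b in BOUNDARIES.values() for x in b["subjects"]}
--         return bool(kws & S)
--     if mode == "union":
--         U = {norm(x) for b in BOUNDARIES.values()
--                      for x in b["triggers"] + b["subjects"]}
--         return bool(kws & U)
--     if mode == "intersect":
--         return any(kws & {norm(x) for x in b["triggers"]}
--                    and kws & {norm(x) for x in b["subjects"]}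
--                    for b in BOUNDARIES.values())
--     return False
-- ===== Notes on version B (the rewrite author's own statement) =====
-- stated objective: simpler
-- what changed: A loops over boundaries testing all four mode conditions inside the loop body; B dispatches on mode once and answers trigger/subject/union from a single precomputed global union of the boundary word sets, keeping a per-boundary pass only for intersect.
import Mathlib
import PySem

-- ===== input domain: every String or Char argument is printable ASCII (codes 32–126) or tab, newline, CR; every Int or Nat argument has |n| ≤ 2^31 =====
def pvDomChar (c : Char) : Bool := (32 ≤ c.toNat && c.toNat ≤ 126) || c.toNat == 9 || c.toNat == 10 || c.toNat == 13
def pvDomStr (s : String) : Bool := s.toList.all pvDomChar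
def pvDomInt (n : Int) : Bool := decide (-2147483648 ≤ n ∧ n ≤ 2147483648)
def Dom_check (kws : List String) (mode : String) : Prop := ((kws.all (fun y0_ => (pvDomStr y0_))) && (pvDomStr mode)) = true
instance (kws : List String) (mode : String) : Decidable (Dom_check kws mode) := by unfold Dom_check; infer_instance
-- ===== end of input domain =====

-- B dispatches on `mode` first and answers trigger/subject/union from one global
-- precomputed union of the boundary word sets (objective: simpler), instead of A's
-- per-boundary loop with four mode tests in its body; return values are identical.

-- Shared module context: BOUNDARIES as (triggers, subjects) pairs in insertion order,
-- and norm = NFKC + lower; NFKC is the identity on the ASCII boundary words it is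
-- applied to, so norm is ported as PySem.Str.lower.
def pvNorm (w : String) : String := PySem.Str.lower w

def pvBoundaries : List (List String × List String) :=
  [ (["charity", "donation", "donate", "align", "patterns", "political", "affiliation"],
     ["political", "party", "voting", "donation"]),
    (["password", "credential", "token", "secret", "key", "api", "auth"],
     ["password", "credential", "secret", "token"]),
    (["medical", "health", "diagnosis", "prescription", "condition", "treatment"],
     ["medical", "health", "diagnosis", "prescription"]),
    (["salary", "compensation", "income", "pay", "bonus", "stock"],
     ["salary", "income", "compensation"]),
    (["location", "address", "home", "gps", "coordinates", "whereabouts"],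
     ["location", "address", "home"]),
    (["proprietary", "confidential", "internal", "source", "algorithm", "model",
      "weights", "training", "dataset", "pii", "personal"],
     ["proprietary", "confidential", "internal", "source", "algorithm", "weights",
      "training", "dataset", "pii", "personal", "identifiable"]) ]

-- ===== PORT A =====
-- bool(kws & t) = the intersection of the two sets is nonempty
def checkLoop (kws : List String) (mode : String) :
    List (List String × List String) → Bool
  | [] => false
  | b :: rest =>
    let t : PySem.Set String := PySem.Set.ofList (b.1.map pvNorm)
    let s : PySem.Set String := PySem.Set.ofList (b.2.map pvNorm)
    let ht := !(PySem.Set.inter (PySem.Set.ofList kws) t).isEmpty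
    let hs := !(PySem.Set.inter (PySem.Set.ofList kws) s).isEmpty
    if mode == "trigger" && ht then true
    else if mode == "subject" && hs then true
    else if mode == "intersect" && (ht && hs) then true
    else if mode == "union" && (ht || hs) then true
    else checkLoop kws mode rest

def check (kws : List String) (mode : String) : Bool :=
  checkLoop kws mode pvBoundaries

-- ===== PORT B =====
def check_alt (kws : List String) (mode : String) : Bool :=
  if mode == "trigger" then
    let T : PySem.Set String :=
      PySem.Set.ofList ((pvBoundaries.flatMap (fun b => b.1)).map pvNorm)
    !(PySem.Set.inter (PySem.Set.ofList kws) T).isEmpty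
  else if mode == "subject" then
    let S : PySem.Set String :=
      PySem.Set.ofList ((pvBoundaries.flatMap (fun b => b.2)).map pvNorm)
    !(PySem.Set.inter (PySem.Set.ofList kws) S).isEmpty
  else if mode == "union" then
    let U : PySem.Set String :=
      PySem.Set.ofList ((pvBoundaries.flatMap (fun b => b.1 ++ b.2)).map pvNorm)
    !(PySem.Set.inter (PySem.Set.ofList kws) U).isEmpty
  else if mode == "intersect" then
    pvBoundaries.any (fun b =>
      !(PySem.Set.inter (PySem.Set.ofList kws)
          (PySem.Set.ofList (b.1.map pvNorm))).isEmpty &&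
      !(PySem.Set.inter (PySem.Set.ofList kws)
          (PySem.Set.ofList (b.2.map pvNorm))).isEmpty)
  else false

-- ===== PRECONDITION & SPEC =====
def Spec_check (kws : List String) (mode : String) (out : Bool) : Prop := out = check_alt kws mode
instance (kws : List String) (mode : String) (out : Bool) : Decidable (Spec_check kws mode out) := by unfold Spec_check; infer_instance

-- ===== CLAIM (what is proved, stated in full; the proofs are below) =====
def Claim_equal_check : Prop := ∀ (kws : List String) (mode : String), Dom_check kws mode → Spec_check kws mode (check kws mode)

-- ===== LEMMAS AND PROOFS =====

-- set(kws) & set(l) is empty iff no keyword lies in l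
theorem inter_nil_iff (kws l : List String) :
    PySem.Set.inter (PySem.Set.ofList kws) (PySem.Set.ofList l) = [] ↔
      ∀ k ∈ kws, k ∉ l := by
  rw [List.eq_nil_iff_forall_not_mem]
  constructor
  · intro h k hk hkl
    exact h k ((PySem.Set.mem_inter _ _ _).mpr ⟨(PySem.Set.mem_ofList _ _).mpr hk,
                                                (PySem.Set.mem_ofList _ _).mpr hkl⟩)
  · intro h k hk
    rw [PySem.Set.mem_inter, PySem.Set.mem_ofList, PySem.Set.mem_ofList] at hk
    exact h k hk.1 hk.2

theorem loop_none (kws : List String) (mode : String)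
    (h1 : (mode == "trigger") = false) (h2 : (mode == "subject") = false)
    (h3 : (mode == "intersect") = false) (h4 : (mode == "union") = false) :
    ∀ bs, checkLoop kws mode bs = false := by
  intro bs
  induction bs with
  | nil => rfl
  | cons b rest ih => simp [checkLoop, h1, h2, h3, h4, ih]

theorem loop_trigger (kws : List String) :
    ∀ bs, checkLoop kws "trigger" bs = true ↔
      ∃ b ∈ bs, ∃ k ∈ kws, k ∈ b.1.map pvNorm := by
  intro bs
  induction bs with
  | nil => simp [checkLoop]
  | cons b rest ih =>
    simp [checkLoop, ih, inter_nil_iff]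

theorem loop_subject (kws : List String) :
    ∀ bs, checkLoop kws "subject" bs = true ↔
      ∃ b ∈ bs, ∃ k ∈ kws, k ∈ b.2.map pvNorm := by
  intro bs
  induction bs with
  | nil => simp [checkLoop]
  | cons b rest ih =>
    simp [checkLoop, ih, inter_nil_iff]

theorem loop_intersect (kws : List String) :
    ∀ bs, checkLoop kws "intersect" bs = true ↔
      ∃ b ∈ bs, (∃ k ∈ kws, k ∈ b.1.map pvNorm) ∧ (∃ k ∈ kws, k ∈ b.2.map pvNorm) := by
  intro bs
  induction bs with
  | nil => simp [checkLoop]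
  | cons b rest ih =>
    simp [checkLoop, ih, inter_nil_iff]

theorem loop_union (kws : List String) :
    ∀ bs, checkLoop kws "union" bs = true ↔
      ∃ b ∈ bs, ∃ k ∈ kws, (k ∈ b.1.map pvNorm ∨ k ∈ b.2.map pvNorm) := by
  intro bs
  induction bs with
  | nil => simp [checkLoop]
  | cons b rest ih =>
    simp [checkLoop, ih, inter_nil_iff]
    constructor
    · rintro ((⟨x, hx, hxb⟩ | ⟨x, hx, hxb⟩) | h)
      · exact Or.inl ⟨pvNorm x, hx, Or.inl ⟨x, hxb, rfl⟩⟩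
      · exact Or.inl ⟨pvNorm x, hx, Or.inr ⟨x, hxb, rfl⟩⟩
      · exact Or.inr h
    · rintro (⟨k, hk, (⟨a, ha, rfl⟩ | ⟨a, ha, rfl⟩)⟩ | h)
      · exact Or.inl (Or.inl ⟨a, hk, ha⟩)
      · exact Or.inl (Or.inr ⟨a, hk, ha⟩)
      · exact Or.inr h

theorem alt_trigger (kws : List String) :
    check_alt kws "trigger" = true ↔
      ∃ b ∈ pvBoundaries, ∃ k ∈ kws, k ∈ b.1.map pvNorm := by
  unfold check_alt
  rw [if_pos (by decide)]
  simp only [Bool.not_eq_eq_eq_not, Bool.not_true, List.isEmpty_eq_false_iff,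
             ne_eq, inter_nil_iff]
  simp [List.mem_flatMap]
  tauto

theorem alt_subject (kws : List String) :
    check_alt kws "subject" = true ↔
      ∃ b ∈ pvBoundaries, ∃ k ∈ kws, k ∈ b.2.map pvNorm := by
  unfold check_alt
  rw [if_neg (by decide), if_pos (by decide)]
  simp only [Bool.not_eq_eq_eq_not, Bool.not_true, List.isEmpty_eq_false_iff,
             ne_eq, inter_nil_iff]
  simp [List.mem_flatMap]
  tauto

theorem alt_union (kws : List String) :
    check_alt kws "union" = true ↔
      ∃ b ∈ pvBoundaries, ∃ k ∈ kws, (k ∈ b.1.map pvNorm ∨ k ∈ b.2.map pvNorm) := by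
  unfold check_alt
  rw [if_neg (by decide), if_neg (by decide), if_pos (by decide)]
  simp only [Bool.not_eq_eq_eq_not, Bool.not_true, List.isEmpty_eq_false_iff,
             ne_eq, inter_nil_iff]
  simp [List.mem_flatMap]
  constructor
  · rintro ⟨x, hx, t, s, hbs, (hxt | hxs)⟩
    · exact ⟨t, s, hbs, pvNorm x, hx, Or.inl ⟨x, hxt, rfl⟩⟩
    · exact ⟨t, s, hbs, pvNorm x, hx, Or.inr ⟨x, hxs, rfl⟩⟩
  · rintro ⟨t, s, hbs, k, hk, (⟨a, ha, rfl⟩ | ⟨a, ha, rfl⟩)⟩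
    · exact ⟨a, hk, t, s, hbs, Or.inl ha⟩
    · exact ⟨a, hk, t, s, hbs, Or.inr ha⟩

theorem alt_intersect (kws : List String) :
    check_alt kws "intersect" = true ↔
      ∃ b ∈ pvBoundaries, (∃ k ∈ kws, k ∈ b.1.map pvNorm) ∧ (∃ k ∈ kws, k ∈ b.2.map pvNorm) := by
  unfold check_alt
  rw [if_neg (by decide), if_neg (by decide), if_neg (by decide), if_pos (by decide)]
  simp [inter_nil_iff]

theorem alt_none (kws : List String) (mode : String)
    (h1 : (mode == "trigger") = false) (h2 : (mode == "subject") = false)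
    (h3 : (mode == "intersect") = false) (h4 : (mode == "union") = false) :
    check_alt kws mode = false := by
  unfold check_alt
  simp [h1, h2, h3, h4]

-- ===== VERDICT (by name: the statement is the Claim_ definition above) =====
theorem check_spec : Claim_equal_check := by
  intro kws mode _
  unfold Spec_check
  by_cases h1 : mode = "trigger"
  · subst h1
    rw [Bool.eq_iff_iff, check, loop_trigger, alt_trigger]
  · by_cases h2 : mode = "subject"
    · subst h2
      rw [Bool.eq_iff_iff, check, loop_subject, alt_subject]
    · by_cases h3 : mode = "intersect"
      · subst h3
        rw [Bool.eq_iff_iff, check, loop_intersect, alt_intersect]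
      · by_cases h4 : mode = "union"
        · subst h4
          rw [Bool.eq_iff_iff, check, loop_union, alt_union]
        · rw [check, loop_none kws mode (beq_eq_false_iff_ne.mpr h1)
                (beq_eq_false_iff_ne.mpr h2) (beq_eq_false_iff_ne.mpr h3)
                (beq_eq_false_iff_ne.mpr h4),
              alt_none kws mode (beq_eq_false_iff_ne.mpr h1)
                (beq_eq_false_iff_ne.mpr h2) (beq_eq_false_iff_ne.mpr h3)
                (beq_eq_false_iff_ne.mpr h4)]
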